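-- pv_equiv track=rewrite | github.com/Marco-Colombi/Homework-5-ADM | func_4.py | Return_Walk
-- ===== SOURCE A (Python) =====
-- def Return_Walk(delta, walk, node, start):
--     prev = delta[node - 1] + 1
--     walk.append(prev)
--     if prev == start:
--         return walk
--     else:
--         new_node = delta[node - 1] + 1
--         return Return_Walk(delta, walk, new_node, start)
-- ===== SOURCE B (Python) =====
-- def Return_Walk(delta, walk, node, start):
--     # Iterative rewrite of the tail recursion: advance along the delta chain,
--     # appending each visited node to walk, until start is reached.
--     while True:
--         node = delta[node - 1] + 1
--         walk.append(node)
--         if node == start: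
--             return walk
-- ===== Notes on version B (the rewrite author's own statement) =====
-- stated objective: simpler
-- what changed: Replaces the tail recursion (with its redundant new_node recomputation) by a plain iterative while-loop that advances the node and appends it to walk until start is reached.
import Mathlib
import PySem

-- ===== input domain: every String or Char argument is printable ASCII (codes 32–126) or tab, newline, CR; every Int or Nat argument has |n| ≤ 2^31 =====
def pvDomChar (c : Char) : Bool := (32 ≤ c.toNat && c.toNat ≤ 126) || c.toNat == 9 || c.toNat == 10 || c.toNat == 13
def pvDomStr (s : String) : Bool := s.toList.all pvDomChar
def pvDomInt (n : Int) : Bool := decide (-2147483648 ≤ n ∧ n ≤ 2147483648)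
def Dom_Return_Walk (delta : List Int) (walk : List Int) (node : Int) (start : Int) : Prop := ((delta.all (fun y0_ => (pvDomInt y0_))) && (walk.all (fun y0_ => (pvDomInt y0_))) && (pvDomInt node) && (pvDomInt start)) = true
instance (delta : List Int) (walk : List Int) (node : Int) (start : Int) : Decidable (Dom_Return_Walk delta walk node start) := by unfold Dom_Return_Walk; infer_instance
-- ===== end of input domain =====

-- B replaces A's tail recursion (and its redundant new_node recomputation) by a plain iterative
-- while-loop (simpler); equivalence is about the RETURN value — both mutate walk identically.

-- ===== PORT A =====
-- A recurses until prev == start; the fuel (delta.length + 1) only makes the recursion total: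
-- under Pre_Return_Walk (A terminates) it is never exhausted, and exhaustion / IndexError
-- (pyGet? = none) both lie outside Pre_Return_Walk.
def Return_WalkFuel (fuel : Nat) (delta : List Int) (walk : List Int) (node : Int) (start : Int) : List Int :=
  match fuel with
  | 0 => walk
  | fuel + 1 =>
    match PySem.List.pyGet? delta (node - 1) with
    | none => walk            -- Python raises IndexError here; excluded by Pre_Return_Walk
    | some v =>
      let prev := v + 1
      let walk := walk ++ [prev]
      if prev = start then walk
      else
        let new_node := v + 1   -- A recomputes delta[node-1]+1; same value
        Return_WalkFuel fuel delta walk new_node start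

def Return_Walk (delta : List Int) (walk : List Int) (node : Int) (start : Int) : List Int :=
  Return_WalkFuel (delta.length + 1) delta walk node start

-- ===== PORT B =====
-- Source B's `while True` loop, modelled as a fold of the loop body over delta.length + 1 dummy
-- iterations (fuel; never exhausted under Pre_Return_Walk) with a done-flag that models the
-- `return` exit (once set, remaining iterations are no-ops). State: (walk, node, done).
-- The out-of-range default 0 is never used under Pre_Return_Walk (Python raises IndexError there).
def Return_Walk_alt (delta : List Int) (walk : List Int) (node : Int) (start : Int) : List Int :=
  (((List.range (delta.length + 1)).foldl
    (fun (st : List Int × Int × Bool) _ =>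
      if st.2.2 then st
      else
        let nd := (PySem.List.pyGet? delta (st.2.1 - 1)).getD 0 + 1
        (st.1 ++ [nd], nd, nd == start))
    (walk, node, false))).1

-- ===== PRECONDITION & SPEC =====
-- One step along the chain: node ↦ delta[node-1] + 1 (none = IndexError).
def pvStep_Return_Walk (delta : List Int) (x : Int) : Option Int :=
  (PySem.List.pyGet? delta (x - 1)).map (· + 1)

-- "the successor chain from x reaches start within n in-range steps" — a property of the
-- input's successor structure (it builds no walk and is not either port's recursion).
def pvReach_Return_Walk (delta : List Int) (start : Int) : Nat → Int → Bool
  | 0, _ => false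
  | n + 1, x =>
    match pvStep_Return_Walk delta x with
    | none => false
    | some y => y == start || pvReach_Return_Walk delta start n y

-- Pre_: the chain from node reaches start, with every index in range, within delta.length + 1
-- steps (after the first step the node values come from a set of ≤ delta.length values, so a
-- longer successful chain is impossible: beyond that bound Python A raises IndexError or never
-- returns; Pre_ excludes exactly those inputs).
def Pre_Return_Walk (delta : List Int) (walk : List Int) (node : Int) (start : Int) : Prop :=
  pvReach_Return_Walk delta start (delta.length + 1) node = true
instance (delta : List Int) (walk : List Int) (node : Int) (start : Int) : Decidable (Pre_Return_Walk delta walk node start) := by unfold Pre_Return_Walk; infer_instance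

def pvWitness_Return_Walk : List Int × List Int × Int × Int := ([1], [], 1, 2)

def Spec_Return_Walk (delta : List Int) (walk : List Int) (node : Int) (start : Int) (out : List Int) : Prop := out = Return_Walk_alt delta walk node start
instance (delta : List Int) (walk : List Int) (node : Int) (start : Int) (out : List Int) : Decidable (Spec_Return_Walk delta walk node start out) := by unfold Spec_Return_Walk; infer_instance

-- ===== CLAIM (what is proved, stated in full; the proofs are below) =====
def Claim_equal_Return_Walk : Prop := ∀ (delta : List Int) (walk : List Int) (node : Int) (start : Int), Dom_Return_Walk delta walk node start → Pre_Return_Walk delta walk node start → Spec_Return_Walk delta walk node start (Return_Walk delta walk node start)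

-- ===== LEMMAS AND PROOFS =====
-- Proof-only helper: the chain of visited nodes (using the same default-0 reading as B's body).
def pvChain (delta : List Int) (start : Int) : Nat → Int → List Int
  | 0, _ => []
  | n + 1, x =>
    let nd := (PySem.List.pyGet? delta (x - 1)).getD 0 + 1
    if nd == start then [nd] else nd :: pvChain delta start n nd

-- B's loop body: once the done flag is set, the fold is the identity.
theorem B_fold_done {α : Type} (f : List Int × Int × Bool → α → List Int × Int × Bool)
    (hf : ∀ st a, st.2.2 = true → f st a = st) (l : List α) (w : List Int) (x : Int) :
    l.foldl f (w, x, true) = (w, x, true) := by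
  induction l with
  | nil => rfl
  | cons a l ih => simpa [List.foldl, hf (w, x, true) a rfl] using ih

-- B's fold over any index list equals appending the chain (only the length matters).
theorem B_fold_eq (delta : List Int) (start : Int) (l : List Nat) :
    ∀ (w : List Int) (x : Int),
    (l.foldl
      (fun (st : List Int × Int × Bool) _ =>
        if st.2.2 then st
        else
          let nd := (PySem.List.pyGet? delta (st.2.1 - 1)).getD 0 + 1
          (st.1 ++ [nd], nd, nd == start))
      (w, x, false)).1 = w ++ pvChain delta start l.length x := by
  induction l with
  | nil => intro w x; simp [pvChain]
  | cons a l ih =>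
    intro w x
    simp only [List.foldl, List.length_cons, pvChain]
    by_cases h : ((PySem.List.pyGet? delta (x - 1)).getD 0 + 1 == start) = true
    · rw [if_neg (by simp), h]
      rw [B_fold_done _ (by intro st a hst; simp [hst]) l]
      simp
    · simp only [Bool.not_eq_true] at h
      rw [if_neg (by simp), h]
      rw [ih (w ++ [(PySem.List.pyGet? delta (x - 1)).getD 0 + 1]) _]
      simp

-- A's fuelled recursion equals appending the chain, whenever the chain reaches start in fuel steps.
theorem A_fuel_eq (delta : List Int) (start : Int) :
    ∀ (fuel : Nat) (w : List Int) (x : Int),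
    pvReach_Return_Walk delta start fuel x = true →
    Return_WalkFuel fuel delta w x start = w ++ pvChain delta start fuel x := by
  intro fuel
  induction fuel with
  | zero => intro w x h; simp [pvReach_Return_Walk] at h
  | succ n ih =>
    intro w x h
    simp only [pvReach_Return_Walk, pvStep_Return_Walk] at h
    cases hg : PySem.List.pyGet? delta (x - 1) with
    | none => simp [hg] at h
    | some v =>
      simp only [hg, Option.map_some] at h
      simp only [Return_WalkFuel, pvChain, hg, Option.getD_some]
      by_cases he : v + 1 = start
      · simp [he]
      · have hr : pvReach_Return_Walk delta start n (v + 1) = true := by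
          rcases Bool.or_eq_true_iff.mp h with h1 | h1
          · exact absurd (by exact_mod_cast of_decide_eq_true h1) he
          · exact h1
        simp only [beq_iff_eq, if_neg he]
        rw [ih (w ++ [v + 1]) (v + 1) hr]
        simp

-- ===== VERDICT (by name: the statement is the Claim_ definition above) =====
theorem Return_Walk_spec : Claim_equal_Return_Walk := by
  intro delta walk node start _ hpre
  unfold Spec_Return_Walk Return_Walk Return_Walk_alt
  rw [A_fuel_eq delta start _ walk node hpre, B_fold_eq delta start]
  simp
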